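-- pv_equiv track=rewrite | github.com/EliasAroni2000/automatas | Aroni-tp1-v2.py | tokenMenor
-- ===== SOURCE A (Python) =====
-- estado_final = "estado final"
--
-- estadoNoFinal = "estado no aceptado"
--
-- estadoTrampa = "estado trampa"
--
-- def tokenMenor(lexema):
--     estado = 0
--     estadoFinal = [1]
--     caracter = {0:{'<':1},1:{}}
--     for c in lexema:
--         if c in caracter[estado]:
--             estado = caracter[estado][c]
--         else:
--             estado = -1
--             break
--     if estado == -1:
--         return estadoTrampa
--     if estado in estadoFinal:
--         return estado_final
--     else:
--         return estadoNoFinal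
-- ===== SOURCE B (Python) =====
-- estado_final = "estado final"
--
-- estadoNoFinal = "estado no aceptado"
--
-- estadoTrampa = "estado trampa"
--
-- def tokenMenor(lexema):
--     chars = list(lexema)
--     if chars == ['<']:
--         return estado_final
--     if chars == []:
--         return estadoNoFinal
--     return estadoTrampa
-- ===== Notes on version B (the rewrite author's own statement) =====
-- stated objective: simpler
-- what changed: Replaces the DFA transition-table simulation loop with a single structural comparison of the materialized character list against ['<'] / [].
import Mathlib
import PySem

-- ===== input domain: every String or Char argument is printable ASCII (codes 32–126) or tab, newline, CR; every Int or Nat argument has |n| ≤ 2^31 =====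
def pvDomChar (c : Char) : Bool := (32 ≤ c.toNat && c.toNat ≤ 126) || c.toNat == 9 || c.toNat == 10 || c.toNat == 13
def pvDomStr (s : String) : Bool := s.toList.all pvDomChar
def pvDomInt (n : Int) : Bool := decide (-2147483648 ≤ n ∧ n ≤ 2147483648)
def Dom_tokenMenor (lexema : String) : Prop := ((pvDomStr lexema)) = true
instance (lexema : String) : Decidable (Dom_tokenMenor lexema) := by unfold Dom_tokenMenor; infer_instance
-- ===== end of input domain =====

-- B replaces A's DFA transition-table loop by one structural comparison of the character list; objective: simpler.

-- ===== PORT A =====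
-- caracter = {0:{'<':1},1:{}} : lookup of c in caracter[estado]
def tokenMenorTrans (estado : Int) (c : Char) : Option Int :=
  if estado = 0 then (if c = '<' then some 1 else none) else none

-- the for-loop with break: on a missing transition estado := -1 and break
def tokenMenorLoop (estado : Int) : List Char → Int
  | [] => estado
  | c :: rest =>
    match tokenMenorTrans estado c with
    | some s => tokenMenorLoop s rest
    | none => -1

def tokenMenor (lexema : String) : String :=
  let estado := tokenMenorLoop 0 lexema.toList
  if estado = -1 then "estado trampa"
  else if estado = 1 then "estado final"  -- estado in estadoFinal = [1]
  else "estado no aceptado"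

-- ===== PORT B =====
def tokenMenor_alt (lexema : String) : String :=
  let chars := lexema.toList
  if chars = ['<'] then "estado final"
  else if chars = [] then "estado no aceptado"
  else "estado trampa"

-- ===== PRECONDITION & SPEC =====
def Spec_tokenMenor (lexema : String) (out : String) : Prop := out = tokenMenor_alt lexema
instance (lexema : String) (out : String) : Decidable (Spec_tokenMenor lexema out) := by unfold Spec_tokenMenor; infer_instance

-- ===== CLAIM (what is proved, stated in full; the proofs are below) =====
def Claim_equal_tokenMenor : Prop := ∀ (lexema : String), Dom_tokenMenor lexema → Spec_tokenMenor lexema (tokenMenor lexema)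

-- ===== LEMMAS AND PROOFS =====
theorem tokenMenor_eq_alt (lexema : String) : tokenMenor lexema = tokenMenor_alt lexema := by
  unfold tokenMenor tokenMenor_alt
  match h : lexema.toList with
  | [] => simp [tokenMenorLoop]
  | c :: rest =>
    by_cases hc : c = '<'
    · subst hc
      cases rest with
      | nil => simp [tokenMenorLoop, tokenMenorTrans]
      | cons c' rest' => simp [tokenMenorLoop, tokenMenorTrans]
    · simp [tokenMenorLoop, tokenMenorTrans, hc]

-- ===== VERDICT (by name: the statement is the Claim_ definition above) =====
theorem tokenMenor_spec : Claim_equal_tokenMenor := by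
  intro lexema _
  exact tokenMenor_eq_alt lexema
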